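-- pv_equiv track=rewrite | github.com/harshitaa1801/dsa-questions | 1_basic/5_basic_string/3_largest_odd_num_in_string.py | largeOddNumOptimal
-- ===== SOURCE A (Python) =====
-- def largeOddNumOptimal(s):
--
--     ind = -1
--
--     for i in range(len(s)-1, -1, -1):
--         sub = s[i]
--         sub_int = int(sub)
--
--         if sub_int % 2 == 1:
--             ind = i
--             break
--
--     j = 0
--     while j<=ind and s[j] == '0':
--         j+=1
--
--     return s[j: ind+1]
-- ===== SOURCE B (Python) =====
-- def largeOddNumOptimal(s):
--     start = -1
--     end = -1
--     for i, c in enumerate(s):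
--         if start == -1 and c != '0':
--             start = i
--         if int(c) % 2 == 1:
--             end = i
--     return '' if end == -1 else s[start:end + 1]
-- ===== Notes on version B (the rewrite author's own statement) =====
-- stated objective: simpler
-- what changed: A's backward break-scan for the last odd digit plus a separate forward zero-stripping while loop are replaced by one forward pass over enumerate(s) that tracks the first nonzero-character index and the last odd-digit index simultaneously, with a single slice at the end.
-- outside the precondition, e.g. on largeOddNumOptimal('ab3'): A returns 'ab3', B raises ValueError
import Mathlib
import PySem

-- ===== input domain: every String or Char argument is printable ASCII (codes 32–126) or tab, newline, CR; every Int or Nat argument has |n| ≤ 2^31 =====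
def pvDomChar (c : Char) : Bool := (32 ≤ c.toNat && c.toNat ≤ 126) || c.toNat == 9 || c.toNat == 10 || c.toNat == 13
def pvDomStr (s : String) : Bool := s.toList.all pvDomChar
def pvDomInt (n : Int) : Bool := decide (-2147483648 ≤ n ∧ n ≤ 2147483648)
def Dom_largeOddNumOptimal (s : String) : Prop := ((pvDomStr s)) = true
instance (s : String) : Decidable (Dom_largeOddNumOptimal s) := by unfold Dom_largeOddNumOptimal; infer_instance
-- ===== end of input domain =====

-- B replaces A's two opposite-direction scans (backward break-scan for the last odd digit,
-- then a forward zero-stripping while loop) by ONE forward pass over enumerate(s) tracking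
-- both boundaries; objective: simpler/alternative (same O(n) cost).

-- ===== PORT A =====
-- int(sub) % 2 == 1 for a one-character string: exact for digit characters, which are the
-- only characters A evaluates int() on inside Pre_ (outside digits Python's int() raises).
def pvOddA (c : Char) : Bool := (c.toNat - 48) % 2 == 1

-- 'for i in range(len(s)-1, -1, -1): … if …: ind = i; break' with ind initialised to -1
def pvAIndLoop (cs : List Char) : List Int → Int
  | [] => -1
  | i :: rest =>
    match PySem.List.pyGet? cs i with
    | some c => if pvOddA c then i else pvAIndLoop cs rest
    | none => -1   -- unreachable: every generated index is in range

-- 'while j <= ind and s[j] == '0': j += 1'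
def pvAJLoop (cs : List Char) (ind j : Int) : Int :=
  if h : j ≤ ind ∧ PySem.List.pyGet? cs j = some '0' then pvAJLoop cs ind (j + 1) else j
termination_by (ind + 1 - j).toNat
decreasing_by omega

def largeOddNumOptimal (s : String) : String :=
  let cs := s.toList
  let ind := pvAIndLoop cs (PySem.List.pyRange ((cs.length : Int) - 1) (-1) (-1))
  let j := pvAJLoop cs ind 0
  String.mk (PySem.List.slice cs (some j) (some (ind + 1)))

-- ===== PORT B =====
-- loop body: update (start, end) from (i, c); 'int(c) % 2 == 1' is the same pvOddA as in A
def pvBStep (p : Int × Int) (ic : Int × Char) : Int × Int :=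
  ((if p.1 == -1 && ic.2 != '0' then ic.1 else p.1),
   (if pvOddA ic.2 then ic.1 else p.2))

def largeOddNumOptimal_alt (s : String) : String :=
  let cs := s.toList
  let p := (PySem.List.enumerate cs).foldl pvBStep (-1, -1)
  if p.2 == -1 then "" else String.mk (PySem.List.slice cs (some p.1) (some (p.2 + 1)))

-- ===== PRECONDITION & SPEC =====
-- Pre_ restricts to all-digit strings, the function's natural domain: outside it B's int(c)
-- raises ValueError on the first non-digit, while A raises too unless its backward scan
-- breaks at an odd digit before reaching the non-digit (e.g. 'ab3'), in which case A
-- returns a substring containing non-digit characters.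
def Pre_largeOddNumOptimal (s : String) : Prop :=
  s.toList.all (fun c => "0123456789".toList.contains c) = true
instance (s : String) : Decidable (Pre_largeOddNumOptimal s) := by
  unfold Pre_largeOddNumOptimal; infer_instance

def pvWitness_largeOddNumOptimal : String := "0107"

def Spec_largeOddNumOptimal (s : String) (out : String) : Prop := out = largeOddNumOptimal_alt s
instance (s : String) (out : String) : Decidable (Spec_largeOddNumOptimal s out) := by
  unfold Spec_largeOddNumOptimal; infer_instance

-- ===== CLAIM (what is proved, stated in full; the proofs are below) =====
def Claim_equal_largeOddNumOptimal : Prop := ∀ (s : String), Dom_largeOddNumOptimal s → Pre_largeOddNumOptimal s → Spec_largeOddNumOptimal s (largeOddNumOptimal s)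

-- ===== LEMMAS AND PROOFS =====

theorem pvOddA_ne_zero {c : Char} (h : pvOddA c = true) : ¬ (c = '0') := by
  intro heq; subst heq; simp [pvOddA] at h

-- the fold of B over the enumerated list
def pvF (cs : List Char) : Int × Int := (PySem.List.enumerate cs).foldl pvBStep (-1, -1)

theorem pvF_append (cs : List Char) (c : Char) :
    pvF (cs ++ [c]) = pvBStep (pvF cs) ((cs.length : Int), c) := by
  simp [pvF, PySem.List.enumerate_append, PySem.List.enumerate_cons, PySem.List.enumerate_nil,
    List.foldl_append]

-- characterisation of B's 'start': first index whose character is not '0'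
theorem pvF_fst (cs : List Char) :
    (pvF cs).1 = match cs.findIdx? (fun c => c != '0') with
                 | some m => (m : Int)
                 | none => -1 := by
  induction cs using List.reverseRecOn with
  | nil => rfl
  | append_singleton cs c ih =>
    rw [pvF_append, List.findIdx?_append]
    simp only [pvBStep, List.findIdx?_cons, List.findIdx?_nil]
    cases h : cs.findIdx? (fun c => c != '0') with
    | some m =>
      have hm : ((m : Int) == -1) = false := by simp
      simp [ih, h, hm]
    | none =>
      by_cases hc : c = '0'
      · subst hc; simp [ih, h]
      · simp [ih, h, hc]

-- characterisation of B's 'end': -1 and no odd character, or the last odd index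
theorem pvF_snd (cs : List Char) :
    ((pvF cs).2 = -1 ∧ ∀ c ∈ cs, pvOddA c = false) ∨
    (∃ k : Nat, (pvF cs).2 = (k : Int) ∧ k < cs.length ∧ pvOddA (cs.getD k ' ') = true) := by
  induction cs using List.reverseRecOn with
  | nil => left; exact ⟨rfl, by simp⟩
  | append_singleton cs c ih =>
    by_cases hc : pvOddA c = true
    · right
      refine ⟨cs.length, ?_, by simp, ?_⟩
      · rw [pvF_append]; simp [pvBStep, hc]
      · rw [List.getD_eq_getElem?_getD]
        simp [hc]
    · have h2 : (pvF (cs ++ [c])).2 = (pvF cs).2 := by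
        rw [pvF_append]; simp [pvBStep, hc]
      rcases ih with ⟨he, hall⟩ | ⟨k, hk, hklt, hodd⟩
      · left
        refine ⟨by rw [h2, he], ?_⟩
        intro x hx
        rcases List.mem_append.mp hx with hx | hx
        · exact hall x hx
        · simp at hx; subst hx; simpa using hc
      · right
        refine ⟨k, by rw [h2, hk], by simp; omega, ?_⟩
        rwa [List.getD_append _ _ _ _ hklt]

theorem pvAJLoop_stop (cs : List Char) (ind j : Int)
    (h : ¬ (j ≤ ind ∧ PySem.List.pyGet? cs j = some '0')) : pvAJLoop cs ind j = j := by
  rw [pvAJLoop]; simp [h]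

-- A's zero-stripping while loop lands on the first non-'0' index
theorem pvAJLoop_exact (cs : List Char) (ind : Int) (m : Nat)
    (hm : cs.findIdx? (fun c => c != '0') = some m) (hind : (m : Int) ≤ ind) :
    ∀ j : Nat, j ≤ m → pvAJLoop cs ind (j : Int) = (m : Int) := by
  obtain ⟨hmlt, hpm, hbelow⟩ := List.findIdx?_eq_some_iff_getElem.mp hm
  intro j hj
  induction hd : m - j generalizing j with
  | zero =>
    have hjm : j = m := by omega
    subst hjm
    apply pvAJLoop_stop
    rintro ⟨-, hget⟩
    rw [PySem.List.pyGet?_natCast, List.getElem?_eq_getElem hmlt] at hget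
    simp only [Option.some.injEq] at hget
    simp [hget] at hpm
  | succ d ihd =>
    have hjlt : j < m := by omega
    have hz : cs[j]'(by omega) = '0' := by
      have := hbelow j hjlt
      simpa using this
    rw [pvAJLoop]
    have hget : PySem.List.pyGet? cs (j : Int) = some '0' := by
      rw [PySem.List.pyGet?_natCast, List.getElem?_eq_getElem (by omega)]
      simp [hz]
    have hcond : (j : Int) ≤ ind ∧ PySem.List.pyGet? cs (j : Int) = some '0' :=
      ⟨by omega, hget⟩
    rw [dif_pos hcond]
    have : ((j : Int) + 1) = ((j + 1 : Nat) : Int) := by push_cast; ring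
    rw [this]
    exact ihd (j + 1) (by omega) (by omega)

-- A's backward index scan ignores the appended last element once it is ruled out
theorem pvAIndLoop_append (cs : List Char) (c : Char) :
    ∀ idxs : List Int, (∀ i ∈ idxs, 0 ≤ i ∧ i < (cs.length : Int)) →
      pvAIndLoop (cs ++ [c]) idxs = pvAIndLoop cs idxs := by
  intro idxs
  induction idxs with
  | nil => intro _; rfl
  | cons i rest ih =>
    intro hmem
    obtain ⟨hi0, hilt⟩ := hmem i (List.mem_cons_self ..)
    have hget : PySem.List.pyGet? (cs ++ [c]) i = PySem.List.pyGet? cs i := by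
      rw [PySem.List.pyGet?_of_nonneg _ hi0, PySem.List.pyGet?_of_nonneg _ hi0,
        List.getElem?_append_left (by omega)]
    simp only [pvAIndLoop, hget]
    cases PySem.List.pyGet? cs i with
    | none => rfl
    | some d =>
      by_cases hd : pvOddA d = true
      · simp [hd]
      · simp only [Bool.not_eq_true] at hd
        simp [hd]
        exact ih (fun x hx => hmem x (List.mem_cons_of_mem _ hx))

def pvI (cs : List Char) : Int :=
  pvAIndLoop cs (PySem.List.pyRange ((cs.length : Int) - 1) (-1) (-1))

-- A's 'ind' (found scanning backwards with break) equals B's 'end' (last update forwards)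
theorem pvI_eq_F_snd (cs : List Char) : pvI cs = (pvF cs).2 := by
  induction cs using List.reverseRecOn with
  | nil => rfl
  | append_singleton cs c ih =>
    have hlen : ((cs ++ [c]).length : Int) - 1 = (cs.length : Int) := by simp
    have hcons : PySem.List.pyRange ((cs.length : Int)) (-1) (-1) =
        (cs.length : Int) :: PySem.List.pyRange ((cs.length : Int) - 1) (-1) (-1) :=
      PySem.List.pyRange_neg_one_cons (by omega)
    have hgetc : PySem.List.pyGet? (cs ++ [c]) ((cs.length : Int)) = some c := by
      simp
    have hF2 : (pvF (cs ++ [c])).2 = if pvOddA c then (cs.length : Int) else (pvF cs).2 := by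
      rw [pvF_append]; simp [pvBStep]
    by_cases hc : pvOddA c = true
    · simp only [pvI, hlen, hcons, pvAIndLoop, hgetc, hc, if_true, hF2]
    · have hrec : pvI (cs ++ [c]) = pvI cs := by
        simp only [pvI, hlen, hcons, pvAIndLoop, hgetc]
        simp only [Bool.not_eq_true] at hc
        simp only [hc, Bool.false_eq_true, if_false]
        apply pvAIndLoop_append
        intro i hi
        have := PySem.List.mem_pyRange_neg_one.mp hi
        omega
      rw [hrec, hF2, if_neg (by simpa using hc)]
      exact ih

-- A's and B's results as functions of a character list
theorem pvMain (cs : List Char) :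
    String.mk (PySem.List.slice cs (some (pvAJLoop cs (pvI cs) 0)) (some (pvI cs + 1))) =
    (if (pvF cs).2 == -1 then ""
     else String.mk (PySem.List.slice cs (some (pvF cs).1) (some ((pvF cs).2 + 1)))) := by
  have hIF := pvI_eq_F_snd cs
  rcases pvF_snd cs with ⟨he, -⟩ | ⟨k, hk, hklt, hodd⟩
  · rw [hIF, he]
    have hj : pvAJLoop cs (-1) 0 = 0 := pvAJLoop_stop _ _ _ (by rintro ⟨h, -⟩; omega)
    simp only [hj]
    rw [show ((-1 : Int) + 1) = ((0:Nat) : Int) by norm_num, PySem.List.slice_zero_start,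
      PySem.List.slice_to_natCast]
    norm_num
    rfl
  · have hne : ¬ ((pvF cs).2 == -1) = true := by rw [hk]; simp
    rw [if_neg hne]
    -- the character at k is odd, hence not '0'
    have hkc : cs[k]'hklt = cs.getD k ' ' := by
      rw [List.getD_eq_getElem?_getD, List.getElem?_eq_getElem hklt]; rfl
    have hknz : (fun c => c != '0') (cs[k]'hklt) = true := by
      rw [hkc]; simpa using pvOddA_ne_zero hodd
    have hsome : ∃ m, cs.findIdx? (fun c => c != '0') = some m := by
      have : (cs.findIdx? (fun c => c != '0')).isSome = true := by
        rw [List.findIdx?_isSome]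
        exact List.any_eq_true.mpr ⟨cs[k]'hklt, List.getElem_mem hklt, hknz⟩
      exact Option.isSome_iff_exists.mp this
    obtain ⟨m, hm⟩ := hsome
    have hmk : m ≤ k := by
      by_contra hgt
      obtain ⟨hmlt, -, hbelow⟩ := List.findIdx?_eq_some_iff_getElem.mp hm
      exact (hbelow k (by omega)) hknz
    have hfst : (pvF cs).1 = (m : Int) := by rw [pvF_fst, hm]
    have hj : pvAJLoop cs (pvI cs) 0 = (m : Int) := by
      rw [hIF, hk]
      have h0 := pvAJLoop_exact cs (k : Int) m hm (by omega) 0 (by omega)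
      simpa using h0
    rw [hj, hIF, hk, hfst]

-- ===== VERDICT (by name: the statement is the Claim_ definition above) =====
theorem largeOddNumOptimal_spec : Claim_equal_largeOddNumOptimal := by
  intro s _ _
  unfold Spec_largeOddNumOptimal largeOddNumOptimal largeOddNumOptimal_alt
  exact pvMain s.toList
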